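-- pv_equiv track=rewrite | github.com/brunohadlich/Programming-Studies | algorithms/suffix_array.py | sortDouble
-- ===== SOURCE A (Python) =====
-- def sortDouble(s, l, order, class_):
--     len_s = len(s)
--     count = [0] * len_s
--     newOrder = [0] * len_s
--     for i in range(0, len_s):
--         count[class_[i]] = count[class_[i]] + 1
--     for j in range(1, len_s):
--         count[j] = count[j] + count[j - 1]
--     for i in range(len_s - 1, -1, -1):
--         start = (order[i] - l + len_s) % len_s
--         cl = class_[start]
--         count[cl] = count[cl] - 1
--         newOrder[count[cl]] = start
--     return newOrder
-- ===== SOURCE B (Python) =====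
-- def sortDouble(s, l, order, class_):
--     n = len(s)
--     starts = [(order[i] - l + n) % n for i in range(n)]
--     return sorted(starts, key=lambda st: class_[st])
-- ===== Notes on version B (the rewrite author's own statement) =====
-- stated objective: simpler
-- what changed: Replaces the three-pass counting sort (histogram, prefix sums, backward fill into a preallocated array) by building the rotated start positions once and handing them to Python's built-in stable sort keyed on their class.
-- outside the precondition, e.g. on sortDouble('xx', 2, [-3, -2], [-2, 0]): A returns [1, 0], B returns [0, 1]; on sortDouble('xxxx', 2, [1, 0, 3, 0], [3, 2, 1, 0]): A returns [3, 2, 1, 0], B returns [3, 2, 2, 1]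
import Mathlib
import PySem

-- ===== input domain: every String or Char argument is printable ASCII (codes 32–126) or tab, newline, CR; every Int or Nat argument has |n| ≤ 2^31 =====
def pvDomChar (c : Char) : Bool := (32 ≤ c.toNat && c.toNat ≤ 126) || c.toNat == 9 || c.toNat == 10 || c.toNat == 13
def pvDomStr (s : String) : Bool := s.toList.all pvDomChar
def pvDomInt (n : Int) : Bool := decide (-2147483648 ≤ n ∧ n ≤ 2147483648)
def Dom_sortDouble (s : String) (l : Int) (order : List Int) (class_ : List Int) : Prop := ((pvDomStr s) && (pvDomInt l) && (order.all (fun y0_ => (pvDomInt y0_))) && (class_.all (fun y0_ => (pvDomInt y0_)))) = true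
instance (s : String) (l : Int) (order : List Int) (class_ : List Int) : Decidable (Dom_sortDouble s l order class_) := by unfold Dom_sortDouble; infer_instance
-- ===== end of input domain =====

-- B replaces A's three-pass counting sort by one stable comparison sort of the rotated
-- start positions keyed on their class (simpler; same return value on Pre_).

-- ===== PORT A =====
def sortDouble (s : String) (l : Int) (order : List Int) (class_ : List Int) : List Int :=
  let len_s : Int := PySem.Str.len s
  let count : List Int := PySem.List.pyRepeat [(0 : Int)] len_s
  let newOrder : List Int := PySem.List.pyRepeat [(0 : Int)] len_s
  let count := (PySem.List.pyRange 0 len_s 1).foldl (fun count i =>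
      PySem.List.pySetD count (PySem.List.pyGetD class_ i 0)
        (PySem.List.pyGetD count (PySem.List.pyGetD class_ i 0) 0 + 1)) count
  let count := (PySem.List.pyRange 1 len_s 1).foldl (fun count j =>
      PySem.List.pySetD count j
        (PySem.List.pyGetD count j 0 + PySem.List.pyGetD count (j - 1) 0)) count
  let res := (PySem.List.pyRange (len_s - 1) (-1) (-1)).foldl (fun (p : List Int × List Int) i =>
      let start := PySem.Int.mod (PySem.List.pyGetD order i 0 - l + len_s) len_s
      let cl := PySem.List.pyGetD class_ start 0
      let count' := PySem.List.pySetD p.1 cl (PySem.List.pyGetD p.1 cl 0 - 1)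
      let newOrder' := PySem.List.pySetD p.2 (PySem.List.pyGetD count' cl 0) start
      (count', newOrder')) (count, newOrder)
  res.2

-- ===== PORT B =====
def sortDouble_alt (s : String) (l : Int) (order : List Int) (class_ : List Int) : List Int :=
  let len_s : Int := PySem.Str.len s
  let starts : List Int := (PySem.List.pyRange 0 len_s 1).map
      (fun i => PySem.Int.mod (PySem.List.pyGetD order i 0 - l + len_s) len_s)
  PySem.List.sorted starts (fun st => PySem.List.pyGetD class_ st 0) false

-- ===== PRECONDITION & SPEC =====
-- Pre_ excludes inputs on which A raises IndexError (order/class_ shorter than s, or class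
-- values outside [0, len(s))), and two corners where A still returns but its value is an
-- accident of its implementation: negative class values reached via Python's negative-index
-- wraparound into the count array, and rotated start positions that collide modulo len(s),
-- where A's backward fill leaves stale zeros and overwritten slots.
def Pre_sortDouble (s : String) (l : Int) (order : List Int) (class_ : List Int) : Prop :=
  let n := s.toList.length
  n ≤ order.length ∧ n ≤ class_.length ∧
  (∀ x ∈ class_.take n, 0 ≤ x ∧ x < (n : Int)) ∧
  ((order.take n).map (fun o => PySem.Int.mod (o - l + (n : Int)) (n : Int))).Nodup
instance (s : String) (l : Int) (order : List Int) (class_ : List Int) : Decidable (Pre_sortDouble s l order class_) := by unfold Pre_sortDouble; infer_instance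

def pvWitness_sortDouble : String × Int × List Int × List Int := ("ab", 1, [0, 1], [0, 1])

def Spec_sortDouble (s : String) (l : Int) (order : List Int) (class_ : List Int) (out : List Int) : Prop := out = sortDouble_alt s l order class_
instance (s : String) (l : Int) (order : List Int) (class_ : List Int) (out : List Int) : Decidable (Spec_sortDouble s l order class_ out) := by unfold Spec_sortDouble; infer_instance

-- ===== CLAIM (what is proved, stated in full; the proofs are below) =====
def Claim_equal_sortDouble : Prop := ∀ (s : String) (l : Int) (order : List Int) (class_ : List Int), Dom_sortDouble s l order class_ → Pre_sortDouble s l order class_ → Spec_sortDouble s l order class_ (sortDouble s l order class_)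

-- ===== LEMMAS AND PROOFS =====

def bucketCat (key : Int → Int) (N : Int) (ss : List Int) : List Int :=
  (PySem.List.pyRange 0 N 1).flatMap (fun c => ss.filter (fun x => key x == c))

theorem insertBy_cons {α : Type} (before : α → α → Bool) (x y : α) (ys : List α) :
    PySem.List.insertBy before x (y :: ys) =
      if before x y then x :: y :: ys else y :: PySem.List.insertBy before x ys := rfl

theorem insertBy_append_left {α : Type} (before : α → α → Bool) (x : α) (L1 L2 : List α)
    (h : ∀ y ∈ L1, before x y = false) :
    PySem.List.insertBy before x (L1 ++ L2) = L1 ++ PySem.List.insertBy before x L2 := by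
  induction L1 with
  | nil => simp
  | cons y t ih =>
    rw [List.cons_append, insertBy_cons, h y (by simp), ih (fun z hz => h z (by simp [hz]))]
    simp

theorem insertBy_all_before {α : Type} (before : α → α → Bool) (x : α) (L : List α)
    (h : ∀ y ∈ L, before x y = true) :
    PySem.List.insertBy before x L = x :: L := by
  cases L with
  | nil => rfl
  | cons y t => rw [insertBy_cons, h y (by simp)]; simp

theorem sorted_eq_bucketCat (key : Int → Int) (N : Int) (ss : List Int)
    (hk : ∀ x ∈ ss, 0 ≤ key x ∧ key x < N) :
    PySem.List.sorted ss key false = bucketCat key N ss := by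
  rw [PySem.List.sorted_eq_foldl_insertBy]
  induction ss using List.reverseRecOn with
  | nil => simp [bucketCat]
  | append_singleton xs x ih =>
    have hk' : ∀ y ∈ xs, 0 ≤ key y ∧ key y < N := fun y hy => hk y (by simp [hy])
    rw [List.foldl_append, List.foldl_cons, List.foldl_nil, ih hk']
    obtain ⟨hx0, hxN⟩ := hk x (by simp)
    have hsplit : PySem.List.pyRange 0 N 1 =
        PySem.List.pyRange 0 (key x) 1 ++ key x :: PySem.List.pyRange (key x + 1) N 1 := by
      rw [PySem.List.pyRange_one_append 0 (key x) N hx0 (le_of_lt hxN),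
        PySem.List.pyRange_one_cons hxN]
    unfold bucketCat
    rw [hsplit, List.flatMap_append, List.flatMap_append, List.flatMap_cons, List.flatMap_cons]
    rw [insertBy_append_left _ x _ _ (by
      intro y hy
      rcases List.mem_flatMap.1 hy with ⟨c, hc, hyc⟩
      have hcx : c ≤ key x := le_of_lt (PySem.List.mem_pyRange_one.1 hc).2
      have : key y = c := by
        have := List.of_mem_filter hyc; simpa using this
      simp [this]; omega)]
    rw [insertBy_append_left _ x _ _ (by
      intro y hy
      have : key y = key x := by have := List.of_mem_filter hy; simpa using this
      simp [this])]
    rw [insertBy_all_before _ x _ (by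
      intro y hy
      rcases List.mem_flatMap.1 hy with ⟨c, hc, hyc⟩
      have hcx : key x < c := by have := (PySem.List.mem_pyRange_one.1 hc).1; omega
      have : key y = c := by have := List.of_mem_filter hyc; simpa using this
      simp [this]; omega)]
    have h1 : ∀ c ∈ PySem.List.pyRange 0 (key x) 1,
        (xs ++ [x]).filter (fun z => key z == c) = xs.filter (fun z => key z == c) := by
      intro c hc
      have : c < key x := (PySem.List.mem_pyRange_one.1 hc).2
      simp [List.filter_append]
      omega
    have h2 : ∀ c ∈ PySem.List.pyRange (key x + 1) N 1,
        (xs ++ [x]).filter (fun z => key z == c) = xs.filter (fun z => key z == c) := by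
      intro c hc
      have : key x < c := by have := (PySem.List.mem_pyRange_one.1 hc).1; omega
      simp [List.filter_append]
      omega
    rw [List.flatMap_congr h1, List.flatMap_congr h2]
    have h3 : (xs ++ [x]).filter (fun z => key z == key x) =
        xs.filter (fun z => key z == key x) ++ [x] := by
      simp [List.filter_append]
    rw [h3]
    simp



-- array-as-table lemmas
theorem mapRange_pyGetD (n : Nat) (g : Nat → Int) (i : Int) (h0 : 0 ≤ i) (h1 : i < (n : Int)) :
    PySem.List.pyGetD ((List.range n).map g) i 0 = g i.toNat := by
  rw [PySem.List.pyGetD_eq_getElem _ _ h0 (by simpa using h1)]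
  have h2 : i.toNat < n := by omega
  simp

theorem mapRange_pySetD (n : Nat) (g : Nat → Int) (i v : Int) (h0 : 0 ≤ i) (h1 : i < (n : Int)) :
    PySem.List.pySetD ((List.range n).map g) i v =
      (List.range n).map (fun (c : Nat) => if (c : Int) = i then v else g c) := by
  rw [PySem.List.pySetD_of_nonneg _ _ h0]
  apply List.ext_getElem (by simp)
  intro k hk1 hk2
  simp only [List.getElem_set, List.getElem_map, List.getElem_range]
  have hk : k < n := by simpa using hk2
  by_cases h : i.toNat = k
  · have : (k : Int) = i := by omega
    simp [h, this]
  · have : ¬ ((k : Int) = i) := by omega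
    simp [h, this]

-- countP split at one key value
theorem countP_lt_add_one (key : Int → Int) (c : Int) (l : List Int) :
    l.countP (fun x => decide (key x < c + 1)) =
      l.countP (fun x => decide (key x < c)) + l.countP (fun x => key x == c) := by
  induction l with
  | nil => simp
  | cons a t ih =>
    simp only [List.countP_cons, ih]
    by_cases h1 : key a < c
    · have h2 : key a < c + 1 := by omega
      have h3 : ¬ (key a = c) := by omega
      simp [h1, h2, h3]; omega
    · by_cases h4 : key a = c
      · have h2 : key a < c + 1 := by omega
        simp [h1, h2, h4]; omega
      · have h2 : ¬ (key a < c + 1) := by omega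
        simp [h1, h2, h4]

-- Σ_{0 ≤ c' < c} #(key = c') = #(key < c) for nonnegative keys
theorem sum_hist_lt (key : Int → Int) (l : List Int) (hk : ∀ x ∈ l, 0 ≤ key x) :
    ∀ (c : Int), 0 ≤ c →
      ((PySem.List.pyRange 0 c 1).map (fun c' => l.countP (fun x => key x == c'))).sum =
        l.countP (fun x => decide (key x < c)) := by
  intro c hc
  induction c, hc using Int.le_induction with
  | base =>
    rw [PySem.List.pyRange_one_eq_nil (by omega)]
    simp only [List.map_nil, List.sum_nil]
    symm
    rw [List.countP_eq_zero]
    intro x hx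
    have := hk x hx
    simp; omega
  | succ c hc ih =>
    rw [PySem.List.pyRange_one_succ_right hc, List.map_append, List.sum_append, ih,
      countP_lt_add_one]
    simp


-- histogram loop
theorem loop1_eq (n : Nat) (hs : List Int) (hv : ∀ x ∈ hs, 0 ≤ x ∧ x < (n : Int)) (g : Nat → Int) :
    hs.foldl (fun cnt v => PySem.List.pySetD cnt v (PySem.List.pyGetD cnt v 0 + 1))
        ((List.range n).map g) =
      (List.range n).map (fun (c : Nat) => g c + (hs.countP (fun x => x == (c : Int)) : Int)) := by
  induction hs using List.reverseRecOn generalizing g with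
  | nil => simp
  | append_singleton t v ih =>
    have hv' : ∀ x ∈ t, 0 ≤ x ∧ x < (n : Int) := fun x hx => hv x (by simp [hx])
    obtain ⟨h0, h1⟩ := hv v (by simp)
    rw [List.foldl_append, ih hv', List.foldl_cons, List.foldl_nil,
      mapRange_pyGetD n _ v h0 h1, mapRange_pySetD n _ v _ h0 h1]
    apply List.map_congr_left
    intro c hc
    by_cases h : (c : Int) = v
    · have hcv : v.toNat = c := by omega
      simp [h, hcv, List.countP_append]
      omega
    · simp [h, List.countP_append]
      intro habs
      exact absurd habs.symm h


theorem countP_le_eq_lt_add_one (key : Int → Int) (c : Int) (l : List Int) :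
    l.countP (fun x => decide (key x ≤ c)) = l.countP (fun x => decide (key x < c + 1)) := by
  apply List.countP_congr; intro x _; constructor <;> (intro h; simp at h ⊢; omega)

-- prefix-sum loop
theorem loop2_eq (n : Nat) (hs : List Int) (hv : ∀ x ∈ hs, 0 ≤ x) :
    (PySem.List.pyRange 1 (n : Int) 1).foldl
        (fun cnt j => PySem.List.pySetD cnt j
          (PySem.List.pyGetD cnt j 0 + PySem.List.pyGetD cnt (j - 1) 0))
        ((List.range n).map (fun (c : Nat) => (hs.countP (fun x => x == (c : Int)) : Int))) =
      (List.range n).map (fun (c : Nat) => (hs.countP (fun x => decide (x ≤ (c : Int))) : Int)) := by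
  have key : ∀ m : Nat, m ≤ n →
      (PySem.List.pyRange 1 (m : Int) 1).foldl
        (fun cnt j => PySem.List.pySetD cnt j
          (PySem.List.pyGetD cnt j 0 + PySem.List.pyGetD cnt (j - 1) 0))
        ((List.range n).map (fun (c : Nat) => (hs.countP (fun x => x == (c : Int)) : Int))) =
      (List.range n).map (fun (c : Nat) =>
        if c < m then (hs.countP (fun x => decide (x ≤ (c : Int))) : Int)
        else (hs.countP (fun x => x == (c : Int)) : Int)) := by
    intro m
    induction m with
    | zero =>
      intro _
      rw [PySem.List.pyRange_one_eq_nil (by omega)]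
      simp
    | succ m ih =>
      intro hmn
      by_cases hm : m = 0
      · subst hm
        rw [PySem.List.pyRange_one_eq_nil (by omega)]
        simp only [List.foldl_nil]
        apply List.map_congr_left
        intro c hc
        by_cases h : c < 1
        · have hc0 : c = 0 := by omega
          subst hc0
          simp only [if_pos h]
          congr 1
          apply List.countP_congr
          intro x hx
          have := hv x hx
          constructor <;> (intro h2; simp at h2 ⊢; omega)
        · simp [h]
      · have h1m : (1 : Int) ≤ (m : Int) := by omega
        rw [show (((m + 1 : Nat)) : Int) = (m : Int) + 1 by omega,
          PySem.List.pyRange_one_succ_right h1m, List.foldl_append, ih (by omega),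
          List.foldl_cons, List.foldl_nil]
        have hmn' : (m : Int) < (n : Int) := by omega
        have hm0 : (0 : Int) ≤ (m : Int) := by omega
        rw [mapRange_pyGetD n _ (m : Int) hm0 hmn',
          mapRange_pyGetD n _ ((m : Int) - 1) (by omega) (by omega),
          mapRange_pySetD n _ (m : Int) _ hm0 hmn']
        apply List.map_congr_left
        intro c hc
        have hcn : c < n := List.mem_range.1 hc
        by_cases h : (c : Int) = (m : Int)
        · have hcm : c = m := by omega
          have e1 : ((m : Int)).toNat = m := by omega
          have e2 : ((m : Int) - 1).toNat = m - 1 := by omega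
          simp only [hcm, e1, e2]
          have hmm : ¬ (m < m) := by omega
          have hm1 : m - 1 < m := by omega
          rw [if_neg hmm, if_pos hm1, if_pos (show m < m + 1 by omega)]
          have ecast : ((m - 1 : Nat) : Int) = (m : Int) - 1 := by omega
          rw [ecast]
          rw [countP_le_eq_lt_add_one (fun x => x) ((m:Int) - 1),
            countP_le_eq_lt_add_one (fun x => x) (m:Int),
            show (m : Int) - 1 + 1 = (m : Int) by ring,
            countP_lt_add_one (fun x => x) (m : Int)]
          push_cast
          ring
        · rw [if_neg h]
          by_cases h2 : c < m
          · rw [if_pos h2, if_pos (by omega)]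
          · rw [if_neg h2, if_neg (by omega)]
  have := key n (le_refl n)
  rw [this]
  apply List.map_congr_left
  intro c hc
  rw [if_pos (List.mem_range.1 hc)]
-- counting-sort back fill: state after processing a suffix of the starts
def h3 (key : Int → Int) (p : List Int × List Int) (st : Int) : List Int × List Int :=
  let c := key st
  let cnt' := PySem.List.pySetD p.1 c (PySem.List.pyGetD p.1 c 0 - 1)
  (cnt', PySem.List.pySetD p.2 (PySem.List.pyGetD cnt' c 0) st)

def cntSpec (key : Int → Int) (n : Nat) (ss u : List Int) : List Int :=
  (List.range n).map (fun (c : Nat) =>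
    ((u.countP (fun x => key x == (c : Int)) : Int) +
      (ss.countP (fun x => decide (key x < (c : Int))) : Int)))

def blockSpec (key : Int → Int) (ss u : List Int) (c : Int) : List Int :=
  List.replicate (u.countP (fun x => key x == c)) 0 ++
    (ss.filter (fun x => key x == c)).drop (u.countP (fun x => key x == c))

def noSpec (key : Int → Int) (n : Nat) (ss u : List Int) : List Int :=
  (PySem.List.pyRange 0 (n : Int) 1).flatMap (blockSpec key ss u)

theorem blockSpec_length (key : Int → Int) (ss u : List Int) (c : Int)
    (h : u.countP (fun z => key z == c) ≤ ss.countP (fun z => key z == c)) :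
    (blockSpec key ss u c).length = ss.countP (fun z => key z == c) := by
  unfold blockSpec
  rw [List.length_append, List.length_replicate, List.length_drop,
    ← List.countP_eq_length_filter]
  omega

theorem step_eq (key : Int → Int) (n : Nat) (ss u w : List Int) (x : Int)
    (hss : ss = u ++ x :: w)
    (hk : ∀ y ∈ ss, 0 ≤ key y ∧ key y < (n : Int)) :
    h3 key (cntSpec key n ss (u ++ [x]), noSpec key n ss (u ++ [x])) x
      = (cntSpec key n ss u, noSpec key n ss u) := by
  have hkss : ∀ y ∈ ss, 0 ≤ key y := fun y hy => (hk y hy).1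
  obtain ⟨hc0, hcN⟩ := hk x (by rw [hss]; simp)
  have hsubu : u.Sublist ss := by rw [hss]; exact List.sublist_append_left u (x :: w)
  have hsubux : (u ++ [x]).Sublist ss := by
    rw [hss, show u ++ x :: w = (u ++ [x]) ++ w by simp]
    exact List.sublist_append_left _ w
  have hxc : (key x == key x) = true := by simp
  have hcux : (u ++ [x]).countP (fun z => key z == key x)
      = u.countP (fun z => key z == key x) + 1 := by
    rw [List.countP_append]; simp
  have hne : ∀ c' : Int, c' ≠ key x →
      (u ++ [x]).countP (fun z => key z == c') = u.countP (fun z => key z == c') := by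
    intro c' hcc
    rw [List.countP_append]
    have : List.countP (fun z => key z == c') [x] = 0 := by
      simp [beq_iff_eq]
      intro habs
      exact hcc habs.symm
    omega
  have hmc : u.countP (fun z => key z == key x) + 1 ≤ ss.countP (fun z => key z == key x) := by
    have := List.Sublist.countP_le (p := fun z => key z == key x) hsubux
    omega
  have htoNat : ((key x).toNat : Int) = key x := Int.toNat_of_nonneg hc0
  -- first component
  have hcnt' :
      PySem.List.pySetD (cntSpec key n ss (u ++ [x])) (key x)
          (PySem.List.pyGetD (cntSpec key n ss (u ++ [x])) (key x) 0 - 1)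
        = cntSpec key n ss u := by
    unfold cntSpec
    rw [mapRange_pyGetD n _ (key x) hc0 hcN, mapRange_pySetD n _ (key x) _ hc0 hcN]
    apply List.map_congr_left
    intro c' hc'
    by_cases h : (c' : Int) = key x
    · rw [if_pos h]
      rw [htoNat, hcux, h]
      push_cast
      ring
    · rw [if_neg h, hne _ h]
  -- value fetched from the updated counter
  have hget : PySem.List.pyGetD (cntSpec key n ss u) (key x) 0
      = ((u.countP (fun z => key z == key x) : Int) +
          (ss.countP (fun z => decide (key z < key x)) : Int)) := by
    unfold cntSpec
    rw [mapRange_pyGetD n _ (key x) hc0 hcN, htoNat]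
  -- second component
  have hno : PySem.List.pySetD (noSpec key n ss (u ++ [x]))
      ((u.countP (fun z => key z == key x) : Int) +
        (ss.countP (fun z => decide (key z < key x)) : Int)) x
      = noSpec key n ss u := by
    have hcast : ((u.countP (fun z => key z == key x) : Int) +
        (ss.countP (fun z => decide (key z < key x)) : Int))
        = (((u.countP (fun z => key z == key x) +
            ss.countP (fun z => decide (key z < key x)) : Nat)) : Int) := by
      push_cast; ring
    rw [hcast, PySem.List.pySetD_natCast]
    unfold noSpec
    have hsplit : PySem.List.pyRange 0 (n : Int) 1 =
        PySem.List.pyRange 0 (key x) 1 ++ key x :: PySem.List.pyRange (key x + 1) (n : Int) 1 := by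
      rw [PySem.List.pyRange_one_append 0 (key x) (n : Int) hc0 (le_of_lt hcN),
        PySem.List.pyRange_one_cons hcN]
    rw [hsplit, List.flatMap_append, List.flatMap_cons, List.flatMap_append, List.flatMap_cons]
    have hL1 : (PySem.List.pyRange 0 (key x) 1).flatMap (blockSpec key ss (u ++ [x]))
        = (PySem.List.pyRange 0 (key x) 1).flatMap (blockSpec key ss u) := by
      apply List.flatMap_congr
      intro c' hc'
      have : c' < key x := (PySem.List.mem_pyRange_one.1 hc').2
      unfold blockSpec
      rw [hne c' (by omega)]
    have hL2 : (PySem.List.pyRange (key x + 1) (n : Int) 1).flatMap (blockSpec key ss (u ++ [x]))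
        = (PySem.List.pyRange (key x + 1) (n : Int) 1).flatMap (blockSpec key ss u) := by
      apply List.flatMap_congr
      intro c' hc'
      have : key x < c' := by have := (PySem.List.mem_pyRange_one.1 hc').1; omega
      unfold blockSpec
      rw [hne c' (by omega)]
    rw [hL1, hL2]
    have hlenL1 : ((PySem.List.pyRange 0 (key x) 1).flatMap (blockSpec key ss u)).length
        = ss.countP (fun z => decide (key z < key x)) := by
      rw [List.length_flatMap]
      have hmap : (PySem.List.pyRange 0 (key x) 1).map (fun c' => (blockSpec key ss u c').length)
          = (PySem.List.pyRange 0 (key x) 1).map (fun c' => ss.countP (fun z => key z == c')) := by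
        apply List.map_congr_left
        intro c' _
        exact blockSpec_length key ss u c' (List.Sublist.countP_le hsubu)
      rw [hmap, sum_hist_lt key ss hkss (key x) hc0]
    rw [List.set_append_right _ _ (by omega)]
    congr 1
    have hidx : u.countP (fun z => key z == key x) +
        ss.countP (fun z => decide (key z < key x)) -
        ((PySem.List.pyRange 0 (key x) 1).flatMap (blockSpec key ss u)).length
        = u.countP (fun z => key z == key x) := by omega
    rw [hidx]
    have hblen : (blockSpec key ss (u ++ [x]) (key x)).length
        = ss.countP (fun z => key z == key x) :=
      blockSpec_length key ss (u ++ [x]) (key x) (by omega)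
    rw [List.set_append_left _ _ (by omega)]
    congr 1
    -- block update
    unfold blockSpec
    rw [hcux]
    have hD : ss.filter (fun z => key z == key x)
        = u.filter (fun z => key z == key x) ++ x :: w.filter (fun z => key z == key x) := by
      rw [hss, List.filter_append, List.filter_cons]
      simp
    have hfl : (u.filter (fun z => key z == key x)).length = u.countP (fun z => key z == key x) :=
      List.countP_eq_length_filter.symm
    have hdropt : (ss.filter (fun z => key z == key x)).drop (u.countP (fun z => key z == key x))
        = x :: w.filter (fun z => key z == key x) := by
      rw [hD, ← hfl, List.drop_left]
    have hdropt1 : (ss.filter (fun z => key z == key x)).drop (u.countP (fun z => key z == key x) + 1)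
        = w.filter (fun z => key z == key x) := by
      rw [← List.drop_drop, hdropt]
      simp
    rw [hdropt, hdropt1, List.replicate_succ']
    rw [show (List.replicate (u.countP (fun z => key z == key x)) (0:Int) ++ [0]) ++
          w.filter (fun z => key z == key x)
        = List.replicate (u.countP (fun z => key z == key x)) (0:Int) ++
          ([0] ++ w.filter (fun z => key z == key x)) by simp]
    rw [List.set_append_right _ _ (by simp)]
    simp
  show (PySem.List.pySetD (cntSpec key n ss (u ++ [x])) (key x)
      (PySem.List.pyGetD (cntSpec key n ss (u ++ [x])) (key x) 0 - 1),
    PySem.List.pySetD (noSpec key n ss (u ++ [x]))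
      (PySem.List.pyGetD (PySem.List.pySetD (cntSpec key n ss (u ++ [x])) (key x)
        (PySem.List.pyGetD (cntSpec key n ss (u ++ [x])) (key x) 0 - 1)) (key x) 0) x)
      = (cntSpec key n ss u, noSpec key n ss u)
  rw [hcnt', hget, hno]
theorem loop3_fold (key : Int → Int) (n : Nat) (ss : List Int)
    (hk : ∀ y ∈ ss, 0 ≤ key y ∧ key y < (n : Int)) :
    ∀ (r u w : List Int), ss = u ++ r ++ w →
      r.reverse.foldl (h3 key) (cntSpec key n ss (u ++ r), noSpec key n ss (u ++ r))
        = (cntSpec key n ss u, noSpec key n ss u) := by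
  intro r
  induction r using List.reverseRecOn with
  | nil => intro u w h; simp
  | append_singleton r' x ih =>
    intro u w h
    have hss' : ss = (u ++ r') ++ x :: w := by rw [h]; simp
    rw [List.reverse_append, List.reverse_singleton, List.singleton_append, List.foldl_cons,
      show u ++ (r' ++ [x]) = (u ++ r') ++ [x] by simp,
      step_eq key n ss (u ++ r') w x hss' hk]
    exact ih u ([x] ++ w) (by rw [h]; simp)

-- initial newOrder: all-zero array
theorem noSpec_full (key : Int → Int) (n : Nat) (ss : List Int)
    (hk : ∀ y ∈ ss, 0 ≤ key y ∧ key y < (n : Int)) (hlen : ss.length = n) :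
    noSpec key n ss ss = List.replicate n 0 := by
  rw [List.eq_replicate_iff]
  constructor
  · rw [noSpec, List.length_flatMap]
    have hmap : (PySem.List.pyRange 0 (n : Int) 1).map (fun c' => (blockSpec key ss ss c').length)
        = (PySem.List.pyRange 0 (n : Int) 1).map (fun c' => ss.countP (fun z => key z == c')) := by
      apply List.map_congr_left
      intro c' _
      exact blockSpec_length key ss ss c' le_rfl
    rw [hmap, sum_hist_lt key ss (fun y hy => (hk y hy).1) (n : Int) (by omega)]
    have hall : List.countP (fun x => decide (key x < (n : Int))) ss = ss.length :=
      List.countP_eq_length.mpr (fun y hy => by simp [(hk y hy).2])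
    rw [hall, hlen]
  · intro b hb
    rcases List.mem_flatMap.1 hb with ⟨c, _, hbc⟩
    unfold blockSpec at hbc
    rcases List.mem_append.1 hbc with h1 | h2
    · exact List.eq_of_mem_replicate h1
    · exfalso
      have hlen2 : (ss.filter (fun z => key z == c)).length = ss.countP (fun z => key z == c) :=
        List.countP_eq_length_filter.symm
      rw [← hlen2, List.drop_length] at h2
      exact absurd h2 (List.not_mem_nil)

-- final newOrder = bucket concatenation
theorem noSpec_nil (key : Int → Int) (n : Nat) (ss : List Int) :
    noSpec key n ss [] = bucketCat key (n : Int) ss := by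
  unfold noSpec bucketCat
  apply List.flatMap_congr
  intro c _
  unfold blockSpec
  simp
theorem pyRange_rev (n : Nat) :
    PySem.List.pyRange ((n : Int) - 1) (-1) (-1) = (PySem.List.pyRange 0 (n : Int) 1).reverse := by
  cases n with
  | zero =>
    rw [PySem.List.pyRange_one_eq_nil (by omega)]
    simp [PySem.List.pyRange]
  | succ m =>
    rw [PySem.List.pyRange_one 0 ((m + 1 : Nat) : Int)]
    simp only [PySem.List.pyRange]
    norm_num
    rw [if_pos (by omega : (-1 : Int) < (m : Int))]
    apply List.ext_getElem (by simp)
    intro k hk1 hk2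
    rw [List.getElem_reverse]
    simp only [List.getElem_map, List.getElem_range, List.length_map, List.length_range]
    have hk : k < m + 1 := by simpa using hk1
    push_cast
    omega
theorem sortDouble_spec : Claim_equal_sortDouble := by
  unfold Claim_equal_sortDouble
  intro s l order class_ _hdom hpre
  unfold Spec_sortDouble
  unfold Pre_sortDouble at hpre
  obtain ⟨hord, hcls, hkeyv, hnodup⟩ := hpre
  set n := s.toList.length with hn
  set key : Int → Int := fun st => PySem.List.pyGetD class_ st 0 with hkeydef
  set f : Int → Int :=
    fun i => PySem.Int.mod (PySem.List.pyGetD order i 0 - l + (n : Int)) (n : Int) with hfdef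
  set ss : List Int := (PySem.List.pyRange 0 (n : Int) 1).map f with hssdef
  -- the range-indexed reads are the list elements
  have hmap_get : ∀ (xs : List Int), n ≤ xs.length →
      (PySem.List.pyRange 0 (n : Int) 1).map (fun i => PySem.List.pyGetD xs i 0) = xs.take n := by
    intro xs hxs
    apply List.ext_getElem (by simp [PySem.List.length_pyRange_one]; omega)
    intro k hk1 hk2
    have hkn : k < n := by simpa [PySem.List.length_pyRange_one] using hk1
    simp only [List.getElem_map]
    rw [PySem.List.getElem_pyRange_one]
    have : (0 : Int) + k = ((k : Nat) : Int) := by omega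
    rw [this, PySem.List.pyGetD_natCast, List.getElem_take,
      List.getD_eq_getElem _ _ (by omega)]
  -- ss equals the list named in Pre_
  have hss_pre : ss = (order.take n).map
      (fun o => PySem.Int.mod (o - l + (n : Int)) (n : Int)) := by
    rw [hssdef, ← hmap_get order hord, List.map_map]
    rfl
  have hss_len : ss.length = n := by
    simp [hssdef, PySem.List.length_pyRange_one]
  have hmem : ∀ x ∈ ss, 0 ≤ x ∧ x < (n : Int) := by
    intro x hx
    rw [hssdef] at hx
    rcases List.mem_map.1 hx with ⟨i, hi, hfi⟩
    have hi' := PySem.List.mem_pyRange_one.1 hi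
    have hNpos : (0 : Int) < (n : Int) := by omega
    rw [← hfi, hfdef]
    exact ⟨PySem.Int.mod_nonneg _ hNpos, PySem.Int.mod_lt _ hNpos⟩
  have hk : ∀ x ∈ ss, 0 ≤ key x ∧ key x < (n : Int) := by
    intro x hx
    obtain ⟨hx0, hxn⟩ := hmem x hx
    have hxlen : x < (class_.length : Int) := by omega
    have hkx : key x = class_[x.toNat]'(by omega) := by
      rw [hkeydef]
      exact PySem.List.pyGetD_eq_getElem _ _ hx0 hxlen
    rw [hkx]
    apply hkeyv
    rw [List.mem_take_iff_getElem]
    exact ⟨x.toNat, by omega, rfl⟩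
  have hperm : ss.Perm (PySem.List.pyRange 0 (n : Int) 1) := by
    apply List.Subperm.perm_of_length_le
    · apply List.subperm_of_subset
      · rw [hss_pre]; exact hnodup
      · intro x hx
        exact PySem.List.mem_pyRange_one.2 (by have := hmem x hx; omega)
    · simp [PySem.List.length_pyRange_one, hss_len]
  have hmap_key : (PySem.List.pyRange 0 (n : Int) 1).map key = class_.take n :=
    hmap_get class_ hcls
  -- histogram of class values = histogram of start keys
  have hhist : ∀ p : Int → Bool, (class_.take n).countP p = ss.countP (fun x => p (key x)) := by
    intro p
    rw [← hmap_key, List.countP_map]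
    exact (hperm.countP_eq _).symm
  -- B side
  have hB : sortDouble_alt s l order class_ = PySem.List.sorted ss key false := rfl
  -- A side
  have hA : sortDouble s l order class_ = noSpec key n ss [] := by
    rw [show sortDouble s l order class_ =
      ((PySem.List.pyRange ((n : Int) - 1) (-1) (-1)).foldl
        (fun (p : List Int × List Int) i => h3 key p (f i))
        ((PySem.List.pyRange 1 (n : Int) 1).foldl
          (fun count j => PySem.List.pySetD count j
            (PySem.List.pyGetD count j 0 + PySem.List.pyGetD count (j - 1) 0))
          ((PySem.List.pyRange 0 (n : Int) 1).foldl
            (fun count i => PySem.List.pySetD count (PySem.List.pyGetD class_ i 0)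
              (PySem.List.pyGetD count (PySem.List.pyGetD class_ i 0) 0 + 1))
            (PySem.List.pyRepeat [(0 : Int)] (n : Int))),
         PySem.List.pyRepeat [(0 : Int)] (n : Int))).2 from rfl]
    rw [PySem.List.pyRepeat_singleton, Int.toNat_natCast]
    -- loop 1
    have hrep : List.replicate n (0 : Int) = (List.range n).map (fun _ => (0 : Int)) := by
      simp
    have hloop1 : (PySem.List.pyRange 0 (n : Int) 1).foldl
        (fun count i => PySem.List.pySetD count (PySem.List.pyGetD class_ i 0)
          (PySem.List.pyGetD count (PySem.List.pyGetD class_ i 0) 0 + 1))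
        (List.replicate n (0 : Int))
        = (List.range n).map
          (fun (c : Nat) => ((class_.take n).countP (fun x => x == (c : Int)) : Int)) := by
      have hfm : (PySem.List.pyRange 0 (n : Int) 1).foldl
          (fun count i => PySem.List.pySetD count (PySem.List.pyGetD class_ i 0)
            (PySem.List.pyGetD count (PySem.List.pyGetD class_ i 0) 0 + 1))
          ((List.range n).map (fun _ => (0 : Int)))
          = (class_.take n).foldl
            (fun count v => PySem.List.pySetD count v (PySem.List.pyGetD count v 0 + 1))
            ((List.range n).map (fun _ => (0 : Int))) := by
        rw [← hmap_get class_ hcls, List.foldl_map]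
      rw [hrep, hfm, loop1_eq n _ (fun x hx => hkeyv x hx) _]
      apply List.map_congr_left
      intro c _
      omega
    rw [hloop1, loop2_eq n (class_.take n) (fun x hx => (hkeyv x hx).1)]
    -- counting array after the prefix sums is cntSpec at the full list
    have hcnt2 : (List.range n).map
        (fun (c : Nat) => ((class_.take n).countP (fun x => decide (x ≤ (c : Int))) : Int))
        = cntSpec key n ss ss := by
      unfold cntSpec
      apply List.map_congr_left
      intro c _
      rw [hhist (fun v => decide (v ≤ (c : Int))),
        countP_le_eq_lt_add_one key (c : Int) ss, countP_lt_add_one key (c : Int) ss]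
      push_cast
      ring
    rw [hcnt2,
      show List.replicate n (0 : Int) = noSpec key n ss ss from
        (noSpec_full key n ss hk hss_len).symm,
      pyRange_rev n]
    -- loop 3
    have hssrev : ((PySem.List.pyRange 0 (n : Int) 1).reverse).map f = ss.reverse := by
      rw [List.map_reverse, hssdef]
    rw [show ((PySem.List.pyRange 0 (n : Int) 1).reverse).foldl
        (fun (p : List Int × List Int) i => h3 key p (f i))
        (cntSpec key n ss ss, noSpec key n ss ss)
        = (ss.reverse).foldl (h3 key) (cntSpec key n ss ss, noSpec key n ss ss) from by
      rw [← hssrev, List.foldl_map]]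
    have hfin := loop3_fold key n ss hk ss [] [] (by simp)
    simp only [List.nil_append] at hfin
    rw [hfin]
  rw [hA, hB, noSpec_nil, sorted_eq_bucketCat key (n : Int) ss hk]
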